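-- pv_equiv track=rewrite | github.com/aballagh-r/NSTX | model.py | _detect_vendor
-- ===== SOURCE A (Python) =====
-- def _detect_vendor(device: dict) -> str:
--     dt = (device.get("device_type") or "").lower()
--     if any(x in dt for x in ("cisco_ios", "cisco_xe", "ios")): return "cisco_ios"
--     if "nxos" in dt or "nx_os" in dt:                          return "cisco_nxos"
--     if "iosxr" in dt or "ios_xr" in dt:                        return "cisco_xr"
--     if "asa" in dt:                                             return "cisco_asa"
--     if "junos" in dt or "juniper" in dt:                        return "juniper"
--     if any(x in dt for x in ("linux", "ubuntu", "debian", "rhel", "centos",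
--                               "kali", "alpine", "unix")):
--         return "linux"
--     if "dell" in dt or "os10" in dt:                            return "dell_os10"
--     if "alcatel" in dt or "aos" in dt:                          return "alcatel_aos"
--     if "fortinet" in dt or "fortigate" in dt:                   return "fortinet"
--     if "paloalto" in dt or "panos" in dt:                       return "paloalto"
--     return "generic"
-- ===== SOURCE B (Python) =====
-- # Substring-dictionary scan: instead of testing every keyword against dt, walk dt once and
-- # look each bounded-length window up in a hash table keyword -> rule priority, keeping the
-- # minimum priority seen; the label list is indexed by that priority.
-- _KW = {
--     "cisco_ios": 0, "cisco_xe": 0, "ios": 0,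
--     "nxos": 1, "nx_os": 1,
--     "iosxr": 2, "ios_xr": 2,
--     "asa": 3,
--     "junos": 4, "juniper": 4,
--     "linux": 5, "ubuntu": 5, "debian": 5, "rhel": 5,
--     "centos": 5, "kali": 5, "alpine": 5, "unix": 5,
--     "dell": 6, "os10": 6,
--     "alcatel": 7, "aos": 7,
--     "fortinet": 8, "fortigate": 8,
--     "paloalto": 9, "panos": 9,
-- }
-- _LABELS = ["cisco_ios", "cisco_nxos", "cisco_xr", "cisco_asa", "juniper",
--            "linux", "dell_os10", "alcatel_aos", "fortinet", "paloalto", "generic"]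
-- _LENS = (3, 4, 5, 6, 7, 8, 9)  # the distinct keyword lengths
--
--
-- def _detect_vendor(device: dict) -> str:
--     dt = (device.get("device_type") or "").lower()
--     best = 10
--     for i in range(len(dt)):
--         for L in _LENS:
--             hit = _KW.get(dt[i:i + L])
--             if hit is not None and hit < best:
--                 best = hit
--     return _LABELS[best]
-- ===== Notes on version B (the rewrite author's own statement) =====
-- stated objective: alternative
-- what changed: Instead of testing each keyword for containment in the device_type string, B slides over the string once and looks every bounded-length window up in a hash table keyword->priority, keeping the minimum priority, then indexes a label list; trades per-keyword substring searches for per-position dictionary lookups.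
import Mathlib
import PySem

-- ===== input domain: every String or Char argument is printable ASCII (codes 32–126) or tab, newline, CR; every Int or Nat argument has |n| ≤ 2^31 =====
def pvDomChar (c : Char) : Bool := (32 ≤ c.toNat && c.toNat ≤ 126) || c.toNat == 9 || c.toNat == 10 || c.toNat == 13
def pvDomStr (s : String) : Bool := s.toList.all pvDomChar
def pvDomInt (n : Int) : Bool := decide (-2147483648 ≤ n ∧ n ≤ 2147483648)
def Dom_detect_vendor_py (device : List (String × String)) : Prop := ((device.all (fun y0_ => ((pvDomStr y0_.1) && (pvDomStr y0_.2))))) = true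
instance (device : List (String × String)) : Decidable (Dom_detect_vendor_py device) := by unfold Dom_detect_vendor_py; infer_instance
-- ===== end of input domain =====

-- B replaces A's per-keyword substring tests by a single sliding-window scan of the string with a
-- hash-table lookup (keyword → rule priority) per window, keeping the minimum priority (objective: alternative).

-- ===== PORT A =====
def detect_vendor_py (device : List (String × String)) : String :=
  let dt := PySem.Str.lower (((PySem.Dict.mk device).get? "device_type").getD "")
  if (["cisco_ios", "cisco_xe", "ios"].any (fun x => PySem.Str.isIn x dt)) then "cisco_ios"
    else if (PySem.Str.isIn "nxos" dt || PySem.Str.isIn "nx_os" dt) then "cisco_nxos"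
    else if (PySem.Str.isIn "iosxr" dt || PySem.Str.isIn "ios_xr" dt) then "cisco_xr"
    else if (PySem.Str.isIn "asa" dt) then "cisco_asa"
    else if (PySem.Str.isIn "junos" dt || PySem.Str.isIn "juniper" dt) then "juniper"
    else if (["linux", "ubuntu", "debian", "rhel", "centos", "kali", "alpine", "unix"].any (fun x => PySem.Str.isIn x dt)) then "linux"
    else if (PySem.Str.isIn "dell" dt || PySem.Str.isIn "os10" dt) then "dell_os10"
    else if (PySem.Str.isIn "alcatel" dt || PySem.Str.isIn "aos" dt) then "alcatel_aos"
    else if (PySem.Str.isIn "fortinet" dt || PySem.Str.isIn "fortigate" dt) then "fortinet"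
    else if (PySem.Str.isIn "paloalto" dt || PySem.Str.isIn "panos" dt) then "paloalto"
  else "generic"

-- ===== PORT B =====
-- Source B's module constants: keyword → priority table, label per priority (10 = no match), window lengths
def pvKw : PySem.Dict String Int := PySem.Dict.mk [("cisco_ios", 0), ("cisco_xe", 0), ("ios", 0), ("nxos", 1), ("nx_os", 1), ("iosxr", 2), ("ios_xr", 2), ("asa", 3), ("junos", 4), ("juniper", 4), ("linux", 5), ("ubuntu", 5), ("debian", 5), ("rhel", 5), ("centos", 5), ("kali", 5), ("alpine", 5), ("unix", 5), ("dell", 6), ("os10", 6), ("alcatel", 7), ("aos", 7), ("fortinet", 8), ("fortigate", 8), ("paloalto", 9), ("panos", 9)]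

def pvLabels : List String :=
  ["cisco_ios", "cisco_nxos", "cisco_xr", "cisco_asa", "juniper",
   "linux", "dell_os10", "alcatel_aos", "fortinet", "paloalto", "generic"]

def pvLens : List Int := [3, 4, 5, 6, 7, 8, 9]

def detect_vendor_py_alt (device : List (String × String)) : String :=
  let dt := PySem.Str.lower (((PySem.Dict.mk device).get? "device_type").getD "")
  let best := (PySem.List.pyRange 0 (PySem.Str.len dt)).foldl
    (fun best i => pvLens.foldl
      (fun best L =>
        match pvKw.get? (PySem.Str.slice dt (some i) (some (i + L))) with
        | some hit => if hit < best then hit else best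
        | none => best) best) 10
  -- best always lands in [0, 10], so Source B's `_LABELS[best]` never raises; pyGetD's default is unreachable
  PySem.List.pyGetD pvLabels best ""

-- ===== PRECONDITION & SPEC =====
def Spec_detect_vendor_py (device : List (String × String)) (out : String) : Prop := out = detect_vendor_py_alt device
instance (device : List (String × String)) (out : String) : Decidable (Spec_detect_vendor_py device out) := by unfold Spec_detect_vendor_py; infer_instance

-- ===== CLAIM (what is proved, stated in full; the proofs are below) =====
def Claim_equal_detect_vendor_py : Prop := ∀ (device : List (String × String)), Dom_detect_vendor_py device → Spec_detect_vendor_py device (detect_vendor_py device)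

-- ===== LEMMAS AND PROOFS =====

-- One step of B's inner loop, as a function of the (position, window length) pair
def pvStep (dt : String) (b : Int) (p : Int × Int) : Int :=
  match pvKw.get? (PySem.Str.slice dt (some p.1) (some (p.1 + p.2))) with
  | some hit => if hit < b then hit else b
  | none => b

-- all (position, length) pairs B's two nested loops visit, in order
def pvPairs (dt : String) : List (Int × Int) :=
  (PySem.List.pyRange 0 (PySem.Str.len dt)).flatMap (fun i => pvLens.map (fun L => (i, L)))

def pvBest (dt : String) : Int := (pvPairs dt).foldl (pvStep dt) 10

-- A's j-th cascade condition (false for j outside 0..9)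
def pvCond (j : Int) (dt : String) : Bool :=
  if j = 0 then (["cisco_ios", "cisco_xe", "ios"].any (fun x => PySem.Str.isIn x dt))
    else if j = 1 then (PySem.Str.isIn "nxos" dt || PySem.Str.isIn "nx_os" dt)
    else if j = 2 then (PySem.Str.isIn "iosxr" dt || PySem.Str.isIn "ios_xr" dt)
    else if j = 3 then (PySem.Str.isIn "asa" dt)
    else if j = 4 then (PySem.Str.isIn "junos" dt || PySem.Str.isIn "juniper" dt)
    else if j = 5 then (["linux", "ubuntu", "debian", "rhel", "centos", "kali", "alpine", "unix"].any (fun x => PySem.Str.isIn x dt))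
    else if j = 6 then (PySem.Str.isIn "dell" dt || PySem.Str.isIn "os10" dt)
    else if j = 7 then (PySem.Str.isIn "alcatel" dt || PySem.Str.isIn "aos" dt)
    else if j = 8 then (PySem.Str.isIn "fortinet" dt || PySem.Str.isIn "fortigate" dt)
    else if j = 9 then (PySem.Str.isIn "paloalto" dt || PySem.Str.isIn "panos" dt)
  else false

lemma pvBest_eq (dt : String) :
    (PySem.List.pyRange 0 (PySem.Str.len dt)).foldl
      (fun best i => pvLens.foldl
        (fun best L =>
          match pvKw.get? (PySem.Str.slice dt (some i) (some (i + L))) with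
          | some hit => if hit < best then hit else best
          | none => best) best) 10 = pvBest dt := by
  unfold pvBest pvPairs
  rw [List.flatMap_def, List.foldl_flatten, List.foldl_map]
  simp only [List.foldl_map]
  rfl

lemma pvStep_le (dt : String) (b : Int) (p : Int × Int) : pvStep dt b p ≤ b := by
  unfold pvStep
  cases h : pvKw.get? (PySem.Str.slice dt (some p.1) (some (p.1 + p.2))) with
  | none => simp
  | some hit => simp only []; split_ifs with hlt <;> omega

lemma foldl_pvStep_le_init (dt : String) (l : List (Int × Int)) :
    ∀ b : Int, l.foldl (pvStep dt) b ≤ b := by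
  induction l with
  | nil => intro b; simp
  | cons a l ih =>
    intro b
    calc (a :: l).foldl (pvStep dt) b = l.foldl (pvStep dt) (pvStep dt b a) := by rw [List.foldl_cons]
    _ ≤ pvStep dt b a := ih _
    _ ≤ b := pvStep_le dt b a

lemma foldl_pvStep_le_hit (dt : String) (l : List (Int × Int)) (p : Int × Int) (h : Int)
    (hp : p ∈ l)
    (hg : pvKw.get? (PySem.Str.slice dt (some p.1) (some (p.1 + p.2))) = some h) :
    ∀ b : Int, l.foldl (pvStep dt) b ≤ h := by
  induction l with
  | nil => cases hp
  | cons a l ih =>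
    intro b
    rcases List.mem_cons.mp hp with rfl | hp'
    · calc (p :: l).foldl (pvStep dt) b = l.foldl (pvStep dt) (pvStep dt b p) := by rw [List.foldl_cons]
      _ ≤ pvStep dt b p := foldl_pvStep_le_init dt l _
      _ ≤ h := by unfold pvStep; rw [hg]; simp only []; split_ifs with hlt <;> omega
    · rw [List.foldl_cons]; exact ih hp' _
  
lemma foldl_pvStep_mem (dt : String) (l : List (Int × Int)) :
    ∀ b : Int, l.foldl (pvStep dt) b = b ∨
      ∃ p ∈ l, ∃ h, pvKw.get? (PySem.Str.slice dt (some p.1) (some (p.1 + p.2))) = some h ∧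
        l.foldl (pvStep dt) b = h := by
  induction l with
  | nil => intro b; left; rfl
  | cons a l ih =>
    intro b
    rw [List.foldl_cons]
    rcases ih (pvStep dt b a) with heq | ⟨p, hp, h, hg, he⟩
    · rw [heq]
      unfold pvStep
      cases hga : pvKw.get? (PySem.Str.slice dt (some a.1) (some (a.1 + a.2))) with
      | none => left; rfl
      | some h =>
        by_cases hlt : h < b
        · right
          exact ⟨a, List.mem_cons_self, h, hga, by simp [hlt]⟩
        · left; simp [hlt]
    · right; exact ⟨p, List.mem_cons_of_mem a hp, h, hg, he⟩

lemma pvLens_pos (L : Int) (hL : L ∈ pvLens) : 0 < L := by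
  simp only [pvLens, List.mem_cons, List.not_mem_nil, or_false] at hL
  rcases hL with rfl | rfl | rfl | rfl | rfl | rfl | rfl <;> omega

lemma pvBest_le_of_isIn (dt : String) (k : String) (pr : Int)
    (hget : pvKw.get? k = some pr)
    (hlen : ((k.toList.length : Nat) : Int) ∈ pvLens)
    (hin : PySem.Str.isIn k dt = true) : pvBest dt ≤ pr := by
  obtain ⟨s, t, hst⟩ := (PySem.Str.isIn_iff_infix k dt).mp hin
  have hL1 : 1 ≤ k.toList.length := by
    have h3 := pvLens_pos _ hlen; omega
  have hslice : PySem.Str.slice dt (some (s.length : Int))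
      (some ((s.length : Int) + (k.toList.length : Int))) = k := by
    apply String.toList_inj.mp
    rw [PySem.Str.toList_slice]
    show PySem.List.slice dt.toList _ _ = _
    rw [PySem.List.slice_natCast_add, ← hst, List.append_assoc, List.drop_left, List.take_left]
  have hlen2 : s.length + (k.toList.length + t.length) = dt.toList.length := by
    rw [← hst]; simp [List.length_append]
  have hi : (s.length : Int) ∈ PySem.List.pyRange 0 (PySem.Str.len dt) := by
    rw [PySem.List.mem_pyRange_one]
    refine ⟨by positivity, ?_⟩
    show (s.length : Int) < (dt.toList.length : Int)
    omega
  have hpair : ((s.length : Int), ((k.toList.length : Nat) : Int)) ∈ pvPairs dt :=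
    List.mem_flatMap.mpr ⟨(s.length : Int), hi,
      List.mem_map.mpr ⟨((k.toList.length : Nat) : Int), hlen, rfl⟩⟩
  refine foldl_pvStep_le_hit dt (pvPairs dt) _ pr hpair ?_ 10
  show pvKw.get? (PySem.Str.slice dt (some (s.length : Int))
      (some ((s.length : Int) + ((k.toList.length : Nat) : Int)))) = some pr
  rw [hslice]; exact hget

lemma pvGetMem (d : PySem.Dict String Int) (k : String) (v : Int)
    (h : d.get? k = some v) : (k, v) ∈ d.items := by
  unfold PySem.Dict.get? at h
  obtain ⟨q, hfind, rfl⟩ := Option.map_eq_some_iff.mp h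
  have hb := List.find?_some hfind
  have hk : q.1 = k := eq_of_beq hb
  have hm := List.mem_of_find?_eq_some hfind
  rw [← hk]
  simpa using hm

lemma pvBest_cases (dt : String) : pvBest dt = 10 ∨
    ∃ k pr, (k, pr) ∈ pvKw.items ∧ PySem.Str.isIn k dt = true ∧ pvBest dt = pr := by
  rcases foldl_pvStep_mem dt (pvPairs dt) 10 with heq | ⟨p, hp, h, hg, he⟩
  · left; exact heq
  · right
    obtain ⟨i, hi, hmap⟩ := List.mem_flatMap.mp hp
    obtain ⟨L, hL, rfl⟩ := List.mem_map.mp hmap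
    obtain ⟨hi0, -⟩ := PySem.List.mem_pyRange_one.mp hi
    have hL0 : 0 < L := pvLens_pos L hL
    refine ⟨PySem.Str.slice dt (some (i, L).1) (some ((i, L).1 + (i, L).2)), h,
      pvGetMem pvKw _ h hg, ?_, he⟩
    -- the slice is an infix of dt, hence Python's `key in dt` holds
    apply (PySem.Str.isIn_iff_infix _ _).mpr
    rw [PySem.Str.toList_slice]
    show PySem.List.slice dt.toList (some i) (some (i + L)) <:+: dt.toList
    obtain ⟨i', rfl⟩ : ∃ i' : Nat, i = (i' : Int) := ⟨i.toNat, (Int.toNat_of_nonneg hi0).symm⟩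
    obtain ⟨L', rfl⟩ : ∃ L' : Nat, L = (L' : Int) := ⟨L.toNat, (Int.toNat_of_nonneg (le_of_lt hL0)).symm⟩
    rw [PySem.List.slice_natCast_add]
    exact (List.take_prefix _ _).isInfix.trans (List.drop_suffix _ _).isInfix

lemma pvPrio_bounds : ∀ q ∈ (pvKw : PySem.Dict String Int).items, 0 ≤ q.2 ∧ q.2 ≤ 9 := by decide

lemma pvCond_of_entry (dt : String) (k : String) (pr : Int)
    (hmem : (k, pr) ∈ (pvKw : PySem.Dict String Int).items)
    (hin : PySem.Str.isIn k dt = true) : pvCond pr dt = true := by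
  simp only [pvKw, List.mem_cons, List.not_mem_nil, or_false, Prod.mk.injEq] at hmem
  rcases hmem with ⟨rfl, rfl⟩|⟨rfl, rfl⟩|⟨rfl, rfl⟩|⟨rfl, rfl⟩|⟨rfl, rfl⟩|⟨rfl, rfl⟩|⟨rfl, rfl⟩|⟨rfl, rfl⟩|⟨rfl, rfl⟩|⟨rfl, rfl⟩|⟨rfl, rfl⟩|⟨rfl, rfl⟩|⟨rfl, rfl⟩|⟨rfl, rfl⟩|⟨rfl, rfl⟩|⟨rfl, rfl⟩|⟨rfl, rfl⟩|⟨rfl, rfl⟩|⟨rfl, rfl⟩|⟨rfl, rfl⟩|⟨rfl, rfl⟩|⟨rfl, rfl⟩|⟨rfl, rfl⟩|⟨rfl, rfl⟩|⟨rfl, rfl⟩|⟨rfl, rfl⟩ <;> simp [pvCond] at hin ⊢ <;> simp [hin]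

lemma pvBest_le_of_cond (dt : String) (j : Int) (hc : pvCond j dt = true) : pvBest dt ≤ j := by
  unfold pvCond at hc
  split_ifs at hc with h0 h1 h2 h3 h4 h5 h6 h7 h8 h9
  · subst h0
    simp only [List.any_cons, List.any_nil, Bool.or_false, Bool.or_eq_true] at hc
    rcases hc with h|h|h
    · exact pvBest_le_of_isIn dt "cisco_ios" 0 (by decide) (by decide) h
    · exact pvBest_le_of_isIn dt "cisco_xe" 0 (by decide) (by decide) h
    · exact pvBest_le_of_isIn dt "ios" 0 (by decide) (by decide) h
  · subst h1
    simp only [Bool.or_eq_true] at hc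
    rcases hc with h|h
    · exact pvBest_le_of_isIn dt "nxos" 1 (by decide) (by decide) h
    · exact pvBest_le_of_isIn dt "nx_os" 1 (by decide) (by decide) h
  · subst h2
    simp only [Bool.or_eq_true] at hc
    rcases hc with h|h
    · exact pvBest_le_of_isIn dt "iosxr" 2 (by decide) (by decide) h
    · exact pvBest_le_of_isIn dt "ios_xr" 2 (by decide) (by decide) h
  · subst h3
    exact pvBest_le_of_isIn dt "asa" 3 (by decide) (by decide) hc
  · subst h4
    simp only [Bool.or_eq_true] at hc
    rcases hc with h|h
    · exact pvBest_le_of_isIn dt "junos" 4 (by decide) (by decide) h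
    · exact pvBest_le_of_isIn dt "juniper" 4 (by decide) (by decide) h
  · subst h5
    simp only [List.any_cons, List.any_nil, Bool.or_false, Bool.or_eq_true] at hc
    rcases hc with h|h|h|h|h|h|h|h
    · exact pvBest_le_of_isIn dt "linux" 5 (by decide) (by decide) h
    · exact pvBest_le_of_isIn dt "ubuntu" 5 (by decide) (by decide) h
    · exact pvBest_le_of_isIn dt "debian" 5 (by decide) (by decide) h
    · exact pvBest_le_of_isIn dt "rhel" 5 (by decide) (by decide) h
    · exact pvBest_le_of_isIn dt "centos" 5 (by decide) (by decide) h
    · exact pvBest_le_of_isIn dt "kali" 5 (by decide) (by decide) h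
    · exact pvBest_le_of_isIn dt "alpine" 5 (by decide) (by decide) h
    · exact pvBest_le_of_isIn dt "unix" 5 (by decide) (by decide) h
  · subst h6
    simp only [Bool.or_eq_true] at hc
    rcases hc with h|h
    · exact pvBest_le_of_isIn dt "dell" 6 (by decide) (by decide) h
    · exact pvBest_le_of_isIn dt "os10" 6 (by decide) (by decide) h
  · subst h7
    simp only [Bool.or_eq_true] at hc
    rcases hc with h|h
    · exact pvBest_le_of_isIn dt "alcatel" 7 (by decide) (by decide) h
    · exact pvBest_le_of_isIn dt "aos" 7 (by decide) (by decide) h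
  · subst h8
    simp only [Bool.or_eq_true] at hc
    rcases hc with h|h
    · exact pvBest_le_of_isIn dt "fortinet" 8 (by decide) (by decide) h
    · exact pvBest_le_of_isIn dt "fortigate" 8 (by decide) (by decide) h
  · subst h9
    simp only [Bool.or_eq_true] at hc
    rcases hc with h|h
    · exact pvBest_le_of_isIn dt "paloalto" 9 (by decide) (by decide) h
    · exact pvBest_le_of_isIn dt "panos" 9 (by decide) (by decide) h

lemma pv_core (dt : String) :
    (if (["cisco_ios", "cisco_xe", "ios"].any (fun x => PySem.Str.isIn x dt)) then "cisco_ios"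
     else if (PySem.Str.isIn "nxos" dt || PySem.Str.isIn "nx_os" dt) then "cisco_nxos"
     else if (PySem.Str.isIn "iosxr" dt || PySem.Str.isIn "ios_xr" dt) then "cisco_xr"
     else if (PySem.Str.isIn "asa" dt) then "cisco_asa"
     else if (PySem.Str.isIn "junos" dt || PySem.Str.isIn "juniper" dt) then "juniper"
     else if (["linux", "ubuntu", "debian", "rhel", "centos", "kali", "alpine", "unix"].any (fun x => PySem.Str.isIn x dt)) then "linux"
     else if (PySem.Str.isIn "dell" dt || PySem.Str.isIn "os10" dt) then "dell_os10"
     else if (PySem.Str.isIn "alcatel" dt || PySem.Str.isIn "aos" dt) then "alcatel_aos"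
     else if (PySem.Str.isIn "fortinet" dt || PySem.Str.isIn "fortigate" dt) then "fortinet"
     else if (PySem.Str.isIn "paloalto" dt || PySem.Str.isIn "panos" dt) then "paloalto"
     else "generic")
    = PySem.List.pyGetD pvLabels (pvBest dt) "" := by
  have hub : ∀ j, pvCond j dt = true → pvBest dt ≤ j := pvBest_le_of_cond dt
  have hbnd : pvBest dt = 10 ∨ (0 ≤ pvBest dt ∧ pvBest dt < 10 ∧ pvCond (pvBest dt) dt = true) := by
    rcases pvBest_cases dt with h | ⟨k, pr, hm, hin, he⟩
    · left; exact h
    · right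
      obtain ⟨hp0, hp9⟩ := pvPrio_bounds _ hm
      rw [he]
      exact ⟨hp0, by omega, pvCond_of_entry dt k pr hm hin⟩
  obtain ⟨b, hB⟩ : ∃ b, pvBest dt = b := ⟨_, rfl⟩
  rw [hB] at hub hbnd ⊢
  rcases hbnd with rfl | ⟨hb0, hb9, hc⟩
  · -- pvBest = 10: no keyword occurs, every cascade test is false
    have e0 : (["cisco_ios", "cisco_xe", "ios"].any (fun x => PySem.Str.isIn x dt)) = false := by
      cases h : (["cisco_ios", "cisco_xe", "ios"].any (fun x => PySem.Str.isIn x dt))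
      · rfl
      · exact absurd (hub 0 h) (by omega)
    have e1 : (PySem.Str.isIn "nxos" dt || PySem.Str.isIn "nx_os" dt) = false := by
      cases h : (PySem.Str.isIn "nxos" dt || PySem.Str.isIn "nx_os" dt)
      · rfl
      · exact absurd (hub 1 h) (by omega)
    have e2 : (PySem.Str.isIn "iosxr" dt || PySem.Str.isIn "ios_xr" dt) = false := by
      cases h : (PySem.Str.isIn "iosxr" dt || PySem.Str.isIn "ios_xr" dt)
      · rfl
      · exact absurd (hub 2 h) (by omega)
    have e3 : (PySem.Str.isIn "asa" dt) = false := by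
      cases h : (PySem.Str.isIn "asa" dt)
      · rfl
      · exact absurd (hub 3 h) (by omega)
    have e4 : (PySem.Str.isIn "junos" dt || PySem.Str.isIn "juniper" dt) = false := by
      cases h : (PySem.Str.isIn "junos" dt || PySem.Str.isIn "juniper" dt)
      · rfl
      · exact absurd (hub 4 h) (by omega)
    have e5 : (["linux", "ubuntu", "debian", "rhel", "centos", "kali", "alpine", "unix"].any (fun x => PySem.Str.isIn x dt)) = false := by
      cases h : (["linux", "ubuntu", "debian", "rhel", "centos", "kali", "alpine", "unix"].any (fun x => PySem.Str.isIn x dt))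
      · rfl
      · exact absurd (hub 5 h) (by omega)
    have e6 : (PySem.Str.isIn "dell" dt || PySem.Str.isIn "os10" dt) = false := by
      cases h : (PySem.Str.isIn "dell" dt || PySem.Str.isIn "os10" dt)
      · rfl
      · exact absurd (hub 6 h) (by omega)
    have e7 : (PySem.Str.isIn "alcatel" dt || PySem.Str.isIn "aos" dt) = false := by
      cases h : (PySem.Str.isIn "alcatel" dt || PySem.Str.isIn "aos" dt)
      · rfl
      · exact absurd (hub 7 h) (by omega)
    have e8 : (PySem.Str.isIn "fortinet" dt || PySem.Str.isIn "fortigate" dt) = false := by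
      cases h : (PySem.Str.isIn "fortinet" dt || PySem.Str.isIn "fortigate" dt)
      · rfl
      · exact absurd (hub 8 h) (by omega)
    have e9 : (PySem.Str.isIn "paloalto" dt || PySem.Str.isIn "panos" dt) = false := by
      cases h : (PySem.Str.isIn "paloalto" dt || PySem.Str.isIn "panos" dt)
      · rfl
      · exact absurd (hub 9 h) (by omega)
    simp_all [pvLabels, PySem.List.pyGetD, PySem.List.pyGet?, PySem.List.pyIdx?]
  · interval_cases b
    · -- b = 0
      have t0 : (["cisco_ios", "cisco_xe", "ios"].any (fun x => PySem.Str.isIn x dt)) = true := hc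
      simp_all [pvLabels, PySem.List.pyGetD, PySem.List.pyGet?, PySem.List.pyIdx?]
    · -- b = 1
      have t1 : (PySem.Str.isIn "nxos" dt || PySem.Str.isIn "nx_os" dt) = true := hc
      have e0 : (["cisco_ios", "cisco_xe", "ios"].any (fun x => PySem.Str.isIn x dt)) = false := by
        cases h : (["cisco_ios", "cisco_xe", "ios"].any (fun x => PySem.Str.isIn x dt))
        · rfl
        · exact absurd (hub 0 h) (by omega)
      simp_all [pvLabels, PySem.List.pyGetD, PySem.List.pyGet?, PySem.List.pyIdx?]
    · -- b = 2
      have t2 : (PySem.Str.isIn "iosxr" dt || PySem.Str.isIn "ios_xr" dt) = true := hc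
      have e0 : (["cisco_ios", "cisco_xe", "ios"].any (fun x => PySem.Str.isIn x dt)) = false := by
        cases h : (["cisco_ios", "cisco_xe", "ios"].any (fun x => PySem.Str.isIn x dt))
        · rfl
        · exact absurd (hub 0 h) (by omega)
      have e1 : (PySem.Str.isIn "nxos" dt || PySem.Str.isIn "nx_os" dt) = false := by
        cases h : (PySem.Str.isIn "nxos" dt || PySem.Str.isIn "nx_os" dt)
        · rfl
        · exact absurd (hub 1 h) (by omega)
      simp_all [pvLabels, PySem.List.pyGetD, PySem.List.pyGet?, PySem.List.pyIdx?]
    · -- b = 3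
      have t3 : (PySem.Str.isIn "asa" dt) = true := hc
      have e0 : (["cisco_ios", "cisco_xe", "ios"].any (fun x => PySem.Str.isIn x dt)) = false := by
        cases h : (["cisco_ios", "cisco_xe", "ios"].any (fun x => PySem.Str.isIn x dt))
        · rfl
        · exact absurd (hub 0 h) (by omega)
      have e1 : (PySem.Str.isIn "nxos" dt || PySem.Str.isIn "nx_os" dt) = false := by
        cases h : (PySem.Str.isIn "nxos" dt || PySem.Str.isIn "nx_os" dt)
        · rfl
        · exact absurd (hub 1 h) (by omega)
      have e2 : (PySem.Str.isIn "iosxr" dt || PySem.Str.isIn "ios_xr" dt) = false := by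
        cases h : (PySem.Str.isIn "iosxr" dt || PySem.Str.isIn "ios_xr" dt)
        · rfl
        · exact absurd (hub 2 h) (by omega)
      simp_all [pvLabels, PySem.List.pyGetD, PySem.List.pyGet?, PySem.List.pyIdx?]
    · -- b = 4
      have t4 : (PySem.Str.isIn "junos" dt || PySem.Str.isIn "juniper" dt) = true := hc
      have e0 : (["cisco_ios", "cisco_xe", "ios"].any (fun x => PySem.Str.isIn x dt)) = false := by
        cases h : (["cisco_ios", "cisco_xe", "ios"].any (fun x => PySem.Str.isIn x dt))
        · rfl
        · exact absurd (hub 0 h) (by omega)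
      have e1 : (PySem.Str.isIn "nxos" dt || PySem.Str.isIn "nx_os" dt) = false := by
        cases h : (PySem.Str.isIn "nxos" dt || PySem.Str.isIn "nx_os" dt)
        · rfl
        · exact absurd (hub 1 h) (by omega)
      have e2 : (PySem.Str.isIn "iosxr" dt || PySem.Str.isIn "ios_xr" dt) = false := by
        cases h : (PySem.Str.isIn "iosxr" dt || PySem.Str.isIn "ios_xr" dt)
        · rfl
        · exact absurd (hub 2 h) (by omega)
      have e3 : (PySem.Str.isIn "asa" dt) = false := by
        cases h : (PySem.Str.isIn "asa" dt)
        · rfl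
        · exact absurd (hub 3 h) (by omega)
      simp_all [pvLabels, PySem.List.pyGetD, PySem.List.pyGet?, PySem.List.pyIdx?]
    · -- b = 5
      have t5 : (["linux", "ubuntu", "debian", "rhel", "centos", "kali", "alpine", "unix"].any (fun x => PySem.Str.isIn x dt)) = true := hc
      have e0 : (["cisco_ios", "cisco_xe", "ios"].any (fun x => PySem.Str.isIn x dt)) = false := by
        cases h : (["cisco_ios", "cisco_xe", "ios"].any (fun x => PySem.Str.isIn x dt))
        · rfl
        · exact absurd (hub 0 h) (by omega)
      have e1 : (PySem.Str.isIn "nxos" dt || PySem.Str.isIn "nx_os" dt) = false := by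
        cases h : (PySem.Str.isIn "nxos" dt || PySem.Str.isIn "nx_os" dt)
        · rfl
        · exact absurd (hub 1 h) (by omega)
      have e2 : (PySem.Str.isIn "iosxr" dt || PySem.Str.isIn "ios_xr" dt) = false := by
        cases h : (PySem.Str.isIn "iosxr" dt || PySem.Str.isIn "ios_xr" dt)
        · rfl
        · exact absurd (hub 2 h) (by omega)
      have e3 : (PySem.Str.isIn "asa" dt) = false := by
        cases h : (PySem.Str.isIn "asa" dt)
        · rfl
        · exact absurd (hub 3 h) (by omega)
      have e4 : (PySem.Str.isIn "junos" dt || PySem.Str.isIn "juniper" dt) = false := by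
        cases h : (PySem.Str.isIn "junos" dt || PySem.Str.isIn "juniper" dt)
        · rfl
        · exact absurd (hub 4 h) (by omega)
      simp_all [pvLabels, PySem.List.pyGetD, PySem.List.pyGet?, PySem.List.pyIdx?]
    · -- b = 6
      have t6 : (PySem.Str.isIn "dell" dt || PySem.Str.isIn "os10" dt) = true := hc
      have e0 : (["cisco_ios", "cisco_xe", "ios"].any (fun x => PySem.Str.isIn x dt)) = false := by
        cases h : (["cisco_ios", "cisco_xe", "ios"].any (fun x => PySem.Str.isIn x dt))
        · rfl
        · exact absurd (hub 0 h) (by omega)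
      have e1 : (PySem.Str.isIn "nxos" dt || PySem.Str.isIn "nx_os" dt) = false := by
        cases h : (PySem.Str.isIn "nxos" dt || PySem.Str.isIn "nx_os" dt)
        · rfl
        · exact absurd (hub 1 h) (by omega)
      have e2 : (PySem.Str.isIn "iosxr" dt || PySem.Str.isIn "ios_xr" dt) = false := by
        cases h : (PySem.Str.isIn "iosxr" dt || PySem.Str.isIn "ios_xr" dt)
        · rfl
        · exact absurd (hub 2 h) (by omega)
      have e3 : (PySem.Str.isIn "asa" dt) = false := by
        cases h : (PySem.Str.isIn "asa" dt)
        · rfl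
        · exact absurd (hub 3 h) (by omega)
      have e4 : (PySem.Str.isIn "junos" dt || PySem.Str.isIn "juniper" dt) = false := by
        cases h : (PySem.Str.isIn "junos" dt || PySem.Str.isIn "juniper" dt)
        · rfl
        · exact absurd (hub 4 h) (by omega)
      have e5 : (["linux", "ubuntu", "debian", "rhel", "centos", "kali", "alpine", "unix"].any (fun x => PySem.Str.isIn x dt)) = false := by
        cases h : (["linux", "ubuntu", "debian", "rhel", "centos", "kali", "alpine", "unix"].any (fun x => PySem.Str.isIn x dt))
        · rfl
        · exact absurd (hub 5 h) (by omega)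
      simp_all [pvLabels, PySem.List.pyGetD, PySem.List.pyGet?, PySem.List.pyIdx?]
    · -- b = 7
      have t7 : (PySem.Str.isIn "alcatel" dt || PySem.Str.isIn "aos" dt) = true := hc
      have e0 : (["cisco_ios", "cisco_xe", "ios"].any (fun x => PySem.Str.isIn x dt)) = false := by
        cases h : (["cisco_ios", "cisco_xe", "ios"].any (fun x => PySem.Str.isIn x dt))
        · rfl
        · exact absurd (hub 0 h) (by omega)
      have e1 : (PySem.Str.isIn "nxos" dt || PySem.Str.isIn "nx_os" dt) = false := by
        cases h : (PySem.Str.isIn "nxos" dt || PySem.Str.isIn "nx_os" dt)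
        · rfl
        · exact absurd (hub 1 h) (by omega)
      have e2 : (PySem.Str.isIn "iosxr" dt || PySem.Str.isIn "ios_xr" dt) = false := by
        cases h : (PySem.Str.isIn "iosxr" dt || PySem.Str.isIn "ios_xr" dt)
        · rfl
        · exact absurd (hub 2 h) (by omega)
      have e3 : (PySem.Str.isIn "asa" dt) = false := by
        cases h : (PySem.Str.isIn "asa" dt)
        · rfl
        · exact absurd (hub 3 h) (by omega)
      have e4 : (PySem.Str.isIn "junos" dt || PySem.Str.isIn "juniper" dt) = false := by
        cases h : (PySem.Str.isIn "junos" dt || PySem.Str.isIn "juniper" dt)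
        · rfl
        · exact absurd (hub 4 h) (by omega)
      have e5 : (["linux", "ubuntu", "debian", "rhel", "centos", "kali", "alpine", "unix"].any (fun x => PySem.Str.isIn x dt)) = false := by
        cases h : (["linux", "ubuntu", "debian", "rhel", "centos", "kali", "alpine", "unix"].any (fun x => PySem.Str.isIn x dt))
        · rfl
        · exact absurd (hub 5 h) (by omega)
      have e6 : (PySem.Str.isIn "dell" dt || PySem.Str.isIn "os10" dt) = false := by
        cases h : (PySem.Str.isIn "dell" dt || PySem.Str.isIn "os10" dt)
        · rfl
        · exact absurd (hub 6 h) (by omega)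
      simp_all [pvLabels, PySem.List.pyGetD, PySem.List.pyGet?, PySem.List.pyIdx?]
    · -- b = 8
      have t8 : (PySem.Str.isIn "fortinet" dt || PySem.Str.isIn "fortigate" dt) = true := hc
      have e0 : (["cisco_ios", "cisco_xe", "ios"].any (fun x => PySem.Str.isIn x dt)) = false := by
        cases h : (["cisco_ios", "cisco_xe", "ios"].any (fun x => PySem.Str.isIn x dt))
        · rfl
        · exact absurd (hub 0 h) (by omega)
      have e1 : (PySem.Str.isIn "nxos" dt || PySem.Str.isIn "nx_os" dt) = false := by
        cases h : (PySem.Str.isIn "nxos" dt || PySem.Str.isIn "nx_os" dt)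
        · rfl
        · exact absurd (hub 1 h) (by omega)
      have e2 : (PySem.Str.isIn "iosxr" dt || PySem.Str.isIn "ios_xr" dt) = false := by
        cases h : (PySem.Str.isIn "iosxr" dt || PySem.Str.isIn "ios_xr" dt)
        · rfl
        · exact absurd (hub 2 h) (by omega)
      have e3 : (PySem.Str.isIn "asa" dt) = false := by
        cases h : (PySem.Str.isIn "asa" dt)
        · rfl
        · exact absurd (hub 3 h) (by omega)
      have e4 : (PySem.Str.isIn "junos" dt || PySem.Str.isIn "juniper" dt) = false := by
        cases h : (PySem.Str.isIn "junos" dt || PySem.Str.isIn "juniper" dt)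
        · rfl
        · exact absurd (hub 4 h) (by omega)
      have e5 : (["linux", "ubuntu", "debian", "rhel", "centos", "kali", "alpine", "unix"].any (fun x => PySem.Str.isIn x dt)) = false := by
        cases h : (["linux", "ubuntu", "debian", "rhel", "centos", "kali", "alpine", "unix"].any (fun x => PySem.Str.isIn x dt))
        · rfl
        · exact absurd (hub 5 h) (by omega)
      have e6 : (PySem.Str.isIn "dell" dt || PySem.Str.isIn "os10" dt) = false := by
        cases h : (PySem.Str.isIn "dell" dt || PySem.Str.isIn "os10" dt)
        · rfl
        · exact absurd (hub 6 h) (by omega)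
      have e7 : (PySem.Str.isIn "alcatel" dt || PySem.Str.isIn "aos" dt) = false := by
        cases h : (PySem.Str.isIn "alcatel" dt || PySem.Str.isIn "aos" dt)
        · rfl
        · exact absurd (hub 7 h) (by omega)
      simp_all [pvLabels, PySem.List.pyGetD, PySem.List.pyGet?, PySem.List.pyIdx?]
    · -- b = 9
      have t9 : (PySem.Str.isIn "paloalto" dt || PySem.Str.isIn "panos" dt) = true := hc
      have e0 : (["cisco_ios", "cisco_xe", "ios"].any (fun x => PySem.Str.isIn x dt)) = false := by
        cases h : (["cisco_ios", "cisco_xe", "ios"].any (fun x => PySem.Str.isIn x dt))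
        · rfl
        · exact absurd (hub 0 h) (by omega)
      have e1 : (PySem.Str.isIn "nxos" dt || PySem.Str.isIn "nx_os" dt) = false := by
        cases h : (PySem.Str.isIn "nxos" dt || PySem.Str.isIn "nx_os" dt)
        · rfl
        · exact absurd (hub 1 h) (by omega)
      have e2 : (PySem.Str.isIn "iosxr" dt || PySem.Str.isIn "ios_xr" dt) = false := by
        cases h : (PySem.Str.isIn "iosxr" dt || PySem.Str.isIn "ios_xr" dt)
        · rfl
        · exact absurd (hub 2 h) (by omega)
      have e3 : (PySem.Str.isIn "asa" dt) = false := by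
        cases h : (PySem.Str.isIn "asa" dt)
        · rfl
        · exact absurd (hub 3 h) (by omega)
      have e4 : (PySem.Str.isIn "junos" dt || PySem.Str.isIn "juniper" dt) = false := by
        cases h : (PySem.Str.isIn "junos" dt || PySem.Str.isIn "juniper" dt)
        · rfl
        · exact absurd (hub 4 h) (by omega)
      have e5 : (["linux", "ubuntu", "debian", "rhel", "centos", "kali", "alpine", "unix"].any (fun x => PySem.Str.isIn x dt)) = false := by
        cases h : (["linux", "ubuntu", "debian", "rhel", "centos", "kali", "alpine", "unix"].any (fun x => PySem.Str.isIn x dt))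
        · rfl
        · exact absurd (hub 5 h) (by omega)
      have e6 : (PySem.Str.isIn "dell" dt || PySem.Str.isIn "os10" dt) = false := by
        cases h : (PySem.Str.isIn "dell" dt || PySem.Str.isIn "os10" dt)
        · rfl
        · exact absurd (hub 6 h) (by omega)
      have e7 : (PySem.Str.isIn "alcatel" dt || PySem.Str.isIn "aos" dt) = false := by
        cases h : (PySem.Str.isIn "alcatel" dt || PySem.Str.isIn "aos" dt)
        · rfl
        · exact absurd (hub 7 h) (by omega)
      have e8 : (PySem.Str.isIn "fortinet" dt || PySem.Str.isIn "fortigate" dt) = false := by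
        cases h : (PySem.Str.isIn "fortinet" dt || PySem.Str.isIn "fortigate" dt)
        · rfl
        · exact absurd (hub 8 h) (by omega)
      simp_all [pvLabels, PySem.List.pyGetD, PySem.List.pyGet?, PySem.List.pyIdx?]

-- ===== VERDICT (by name: the statement is the Claim_ definition above) =====
theorem detect_vendor_py_spec : Claim_equal_detect_vendor_py := by
  intro device _
  unfold Spec_detect_vendor_py detect_vendor_py detect_vendor_py_alt
  simp only []
  rw [pvBest_eq]
  exact pv_core _
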